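-- pv_equiv track=rewrite | github.com/alanddalusi/cracker | cracker.py | count_pattern_size
-- ===== SOURCE A (Python) =====
-- def count_pattern_size(pattern, charset):
--     """Cuenta cuántas combinaciones genera un patrón."""
--     count = 1
--     for ch in pattern:
--         if ch == '?':
--             count *= len(charset)
--         elif ch == '#':
--             count *= 10
--         elif ch == '*':
--             count *= 36
--     return count
-- ===== SOURCE B (Python) =====
-- from collections import Counter
--
-- def count_pattern_size(pattern, charset):
--     """Cuenta cuántas combinaciones genera un patrón."""
--     c = Counter(pattern)
--     return len(charset) ** c['?'] * 10 ** c['#'] * 36 ** c['*']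
-- ===== Notes on version B (the rewrite author's own statement) =====
-- stated objective: simpler
-- what changed: Replaces the per-character scan-and-multiply loop with a one-line closed form: a Counter of the pattern and len(charset)**c['?'] * 10**c['#'] * 36**c['*'].
import Mathlib
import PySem

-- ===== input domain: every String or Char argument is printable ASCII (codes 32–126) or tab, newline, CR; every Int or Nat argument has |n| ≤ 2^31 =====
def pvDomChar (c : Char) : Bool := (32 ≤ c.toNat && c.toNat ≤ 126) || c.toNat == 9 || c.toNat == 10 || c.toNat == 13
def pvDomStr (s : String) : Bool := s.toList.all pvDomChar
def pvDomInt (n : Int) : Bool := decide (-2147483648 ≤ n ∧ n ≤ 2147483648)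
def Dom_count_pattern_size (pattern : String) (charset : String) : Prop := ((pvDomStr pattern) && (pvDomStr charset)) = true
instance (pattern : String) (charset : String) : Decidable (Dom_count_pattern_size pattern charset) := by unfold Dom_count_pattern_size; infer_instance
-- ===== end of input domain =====

-- B replaces A's scan-and-multiply loop with a closed form over character counts (objective: simpler).

-- ===== PORT A =====
-- loop: count starts at 1, multiplied per wildcard character in order
def count_pattern_size (pattern : String) (charset : String) : Int :=
  pattern.toList.foldl
    (fun count ch =>
      if ch = '?' then count * (PySem.Str.len charset)
      else if ch = '#' then count * 10
      else if ch = '*' then count * 36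
      else count)
    1

-- ===== PORT B =====
-- closed form: len(charset)^c['?'] * 10^c['#'] * 36^c['*']
def count_pattern_size_alt (pattern : String) (charset : String) : Int :=
  (PySem.Str.len charset) ^ (pattern.toList.count '?')
    * 10 ^ (pattern.toList.count '#')
    * 36 ^ (pattern.toList.count '*')

-- ===== PRECONDITION & SPEC =====
def Spec_count_pattern_size (pattern : String) (charset : String) (out : Int) : Prop := out = count_pattern_size_alt pattern charset
instance (pattern : String) (charset : String) (out : Int) : Decidable (Spec_count_pattern_size pattern charset out) := by unfold Spec_count_pattern_size; infer_instance

-- ===== CLAIM (what is proved, stated in full; the proofs are below) =====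
def Claim_equal_count_pattern_size : Prop := ∀ (pattern : String) (charset : String), Dom_count_pattern_size pattern charset → Spec_count_pattern_size pattern charset (count_pattern_size pattern charset)

-- ===== LEMMAS AND PROOFS =====

theorem cps_foldl_eq (L : Int) (l : List Char) (acc : Int) :
    l.foldl
      (fun count ch =>
        if ch = '?' then count * L
        else if ch = '#' then count * 10
        else if ch = '*' then count * 36
        else count)
      acc
    = acc * (L ^ (l.count '?') * 10 ^ (l.count '#') * 36 ^ (l.count '*')) := by
  induction l generalizing acc with
  | nil => simp
  | cons c t ih =>
    simp only [List.foldl_cons, ih, List.count_cons]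
    by_cases h1 : c = '?'
    · subst h1; simp; ring
    · by_cases h2 : c = '#'
      · subst h2; simp [h1]; ring
      · by_cases h3 : c = '*'
        · subst h3; simp [h1, h2]; ring
        · simp [h1, h2, h3]

-- ===== VERDICT (by name: the statement is the Claim_ definition above) =====
theorem count_pattern_size_spec : Claim_equal_count_pattern_size := by
  intro pattern charset _
  show _ = _
  unfold count_pattern_size count_pattern_size_alt
  rw [cps_foldl_eq]
  ring
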